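-- pv_equiv track=rewrite | github.com/AlfRonDon/NeuraReport | backend/app/utils/sql_safety.py | _strip_literals_and_comments
-- ===== SOURCE A (Python) =====
-- def _strip_literals_and_comments(sql: str) -> str:
--     """Remove string literals and comments for safer keyword scanning."""
--     if not sql:
--         return ""
--
--     out = []
--     in_single = False
--     in_double = False
--     in_line_comment = False
--     in_block_comment = False
--     i = 0
--
--     while i < len(sql):
--         ch = sql[i]
--         nxt = sql[i + 1] if i + 1 < len(sql) else ""
--
--         if in_line_comment:
--             if ch == "\n":
--                 in_line_comment = False
--                 out.append(" ")
--             i += 1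
--             continue
--
--         if in_block_comment:
--             if ch == "*" and nxt == "/":
--                 in_block_comment = False
--                 i += 2
--                 out.append(" ")
--                 continue
--             i += 1
--             continue
--
--         if not in_single and not in_double:
--             if ch == "-" and nxt == "-":
--                 in_line_comment = True
--                 i += 2
--                 continue
--             if ch == "/" and nxt == "*":
--                 in_block_comment = True
--                 i += 2
--                 continue
--
--         if not in_double and ch == "'":
--             in_single = not in_single
--             out.append(" ")
--             i += 1
--             continue
--
--         if not in_single and ch == '"':
--             in_double = not in_double
--             out.append(" ")
--             i += 1
--             continue
--
--         if in_single or in_double: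
--             out.append(" ")
--             i += 1
--             continue
--
--         out.append(ch)
--         i += 1
--
--     return "".join(out)
-- ===== SOURCE B (Python) =====
-- def _strip_literals_and_comments(sql: str) -> str:
--     """Remove string literals and comments for safer keyword scanning.
--
--     Token-jumping scanner: instead of a char-by-char state machine, jump
--     over each whole literal/comment with str.find.
--     """
--     out = []
--     i = 0
--     n = len(sql)
--     while i < n:
--         c = sql[i]
--         if c == "'" or c == '"':
--             j = sql.find(c, i + 1)
--             if j == -1:
--                 out.append(" " * (n - i))
--                 i = n
--             else:
--                 out.append(" " * (j - i + 1))
--                 i = j + 1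
--         elif sql.startswith("--", i):
--             j = sql.find("\n", i + 2)
--             if j == -1:
--                 i = n
--             else:
--                 out.append(" ")
--                 i = j + 1
--         elif sql.startswith("/*", i):
--             j = sql.find("*/", i + 2)
--             if j == -1:
--                 i = n
--             else:
--                 out.append(" ")
--                 i = j + 2
--         else:
--             out.append(c)
--             i += 1
--     return "".join(out)
-- ===== Notes on version B (the rewrite author's own statement) =====
-- stated objective: alternative
-- what changed: Replaces the char-by-char while loop with four boolean state flags by a token-jumping scanner that skips each whole string literal, line comment or block comment in one str.find jump.
import Mathlib
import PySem

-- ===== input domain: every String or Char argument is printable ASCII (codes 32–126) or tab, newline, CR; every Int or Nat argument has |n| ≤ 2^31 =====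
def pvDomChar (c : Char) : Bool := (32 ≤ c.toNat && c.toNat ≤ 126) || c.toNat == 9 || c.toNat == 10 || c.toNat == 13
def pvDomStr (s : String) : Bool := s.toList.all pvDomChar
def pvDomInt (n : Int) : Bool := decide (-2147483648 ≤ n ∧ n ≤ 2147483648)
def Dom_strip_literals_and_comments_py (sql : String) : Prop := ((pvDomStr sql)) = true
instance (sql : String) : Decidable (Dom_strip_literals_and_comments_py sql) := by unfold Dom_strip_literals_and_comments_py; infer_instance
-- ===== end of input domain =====

-- B replaces A's char-by-char boolean state machine with a token-jumping scanner
-- (each whole literal/comment skipped in one find); objective: alternative structure.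

-- ===== PORT A =====
-- literal transliteration of A's while loop: the position i becomes the remaining
-- character list, the four booleans are the loop state, nxt is the head of the rest.
def pvLoopA : List Char → Bool → Bool → Bool → Bool → List Char
  | [], _, _, _, _ => []
  | ch :: rest, sng, dbl, lc, bc =>
    if lc = true then
      if ch = '\n' then ' ' :: pvLoopA rest sng dbl false bc
      else pvLoopA rest sng dbl lc bc
    else if bc = true then
      if ch = '*' ∧ rest.head? = some '/' then ' ' :: pvLoopA rest.tail sng dbl lc false
      else pvLoopA rest sng dbl lc bc
    else if sng = false ∧ dbl = false ∧ ch = '-' ∧ rest.head? = some '-' then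
      pvLoopA rest.tail sng dbl true bc
    else if sng = false ∧ dbl = false ∧ ch = '/' ∧ rest.head? = some '*' then
      pvLoopA rest.tail sng dbl lc true
    else if dbl = false ∧ ch = '\'' then ' ' :: pvLoopA rest (!sng) dbl lc bc
    else if sng = false ∧ ch = '"' then ' ' :: pvLoopA rest sng (!dbl) lc bc
    else if sng = true ∨ dbl = true then ' ' :: pvLoopA rest sng dbl lc bc
    else ch :: pvLoopA rest sng dbl lc bc
  termination_by cs _ _ _ _ => cs.length
  decreasing_by all_goals simp [List.length_tail]

def strip_literals_and_comments_py (sql : String) : String :=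
  if sql = "" then "" else String.mk (pvLoopA sql.toList false false false false)

-- ===== PORT B =====
-- port of Source B's str.find: index of the first occurrence of q
def pvFind1 (q : Char) : List Char → Option Nat
  | [] => none
  | c :: rest => if c = q then some 0 else (pvFind1 q rest).map (· + 1)

-- port of Source B's sql.find("*/", …): index of the first occurrence of "*/"
def pvFindSS : List Char → Option Nat
  | [] => none
  | c :: rest =>
    if c = '*' ∧ rest.head? = some '/' then some 0
    else (pvFindSS rest).map (· + 1)
  termination_by cs => cs.length

-- Source B's while loop: at each position jump over a whole quoted literal,
-- line comment or block comment, else copy one character.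
def pvScanB : List Char → List Char
  | [] => []
  | c :: rest =>
    if c = '\'' ∨ c = '"' then
      match pvFind1 c rest with
      | some k => List.replicate (k + 2) ' ' ++ pvScanB (rest.drop (k + 1))
      | none => List.replicate (rest.length + 1) ' '
    else if c = '-' ∧ rest.head? = some '-' then
      match pvFind1 '\n' rest.tail with
      | some k => ' ' :: pvScanB (rest.tail.drop (k + 1))
      | none => []
    else if c = '/' ∧ rest.head? = some '*' then
      match pvFindSS rest.tail with
      | some k => ' ' :: pvScanB (rest.tail.drop (k + 2))
      | none => []
    else c :: pvScanB rest
  termination_by cs => cs.length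
  decreasing_by all_goals simp [List.length_drop]

def strip_literals_and_comments_py_alt (sql : String) : String :=
  String.mk (pvScanB sql.toList)

-- ===== PRECONDITION & SPEC =====
def Spec_strip_literals_and_comments_py (sql : String) (out : String) : Prop := out = strip_literals_and_comments_py_alt sql
instance (sql : String) (out : String) : Decidable (Spec_strip_literals_and_comments_py sql out) := by unfold Spec_strip_literals_and_comments_py; infer_instance

-- ===== CLAIM (what is proved, stated in full; the proofs are below) =====
def Claim_equal_strip_literals_and_comments_py : Prop := ∀ (sql : String), Dom_strip_literals_and_comments_py sql → Spec_strip_literals_and_comments_py sql (strip_literals_and_comments_py sql)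

-- ===== LEMMAS AND PROOFS =====

-- inside a single-quoted literal, A emits a space per char until the closing quote
theorem pvLoopA_single (cs : List Char) :
    pvLoopA cs true false false false =
      match pvFind1 '\'' cs with
      | some k => List.replicate (k + 1) ' ' ++ pvLoopA (cs.drop (k + 1)) false false false false
      | none => List.replicate cs.length ' ' := by
  induction cs with
  | nil => simp [pvLoopA, pvFind1]
  | cons c rest ih =>
    by_cases h : c = '\''
    · subst h; simp [pvLoopA, pvFind1]
    · simp [pvLoopA, pvFind1, h]
      rw [ih]
      cases hf : pvFind1 '\'' rest with
      | none => simp [List.replicate_succ]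
      | some k => simp [List.replicate_succ]

-- inside a double-quoted literal, symmetric
theorem pvLoopA_double (cs : List Char) :
    pvLoopA cs false true false false =
      match pvFind1 '"' cs with
      | some k => List.replicate (k + 1) ' ' ++ pvLoopA (cs.drop (k + 1)) false false false false
      | none => List.replicate cs.length ' ' := by
  induction cs with
  | nil => simp [pvLoopA, pvFind1]
  | cons c rest ih =>
    by_cases h : c = '"'
    · subst h; simp [pvLoopA, pvFind1]
    · simp [pvLoopA, pvFind1, h]
      rw [ih]
      cases hf : pvFind1 '"' rest with
      | none => simp [List.replicate_succ]
      | some k => simp [List.replicate_succ]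

-- inside a line comment, A drops chars until a newline (one space) or end (nothing)
theorem pvLoopA_line (cs : List Char) :
    pvLoopA cs false false true false =
      match pvFind1 '\n' cs with
      | some k => ' ' :: pvLoopA (cs.drop (k + 1)) false false false false
      | none => [] := by
  induction cs with
  | nil => simp [pvLoopA, pvFind1]
  | cons c rest ih =>
    by_cases h : c = '\n'
    · subst h; simp [pvLoopA, pvFind1]
    · simp [pvLoopA, pvFind1, h]
      rw [ih]
      cases hf : pvFind1 '\n' rest with
      | none => simp
      | some k => simp

-- inside a block comment, A drops chars until "*/" (one space) or end (nothing)
theorem pvLoopA_block (cs : List Char) :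
    pvLoopA cs false false false true =
      match pvFindSS cs with
      | some k => ' ' :: pvLoopA (cs.drop (k + 2)) false false false false
      | none => [] := by
  induction cs with
  | nil => simp [pvLoopA, pvFindSS]
  | cons c rest ih =>
    by_cases h : c = '*' ∧ rest.head? = some '/'
    · obtain ⟨h1, h2⟩ := h
      subst h1
      cases rest with
      | nil => simp at h2
      | cons d t =>
        simp at h2; subst h2
        simp [pvLoopA, pvFindSS]
    · simp [pvLoopA, pvFindSS, h]
      rw [ih]
      cases hf : pvFindSS rest with
      | none => simp
      | some k => simp

theorem pvMain : ∀ (n : Nat) (cs : List Char), cs.length ≤ n →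
    pvLoopA cs false false false false = pvScanB cs := by
  intro n
  induction n with
  | zero =>
    intro cs h
    have : cs = [] := by cases cs <;> simp_all
    subst this; simp [pvLoopA, pvScanB]
  | succ n ih =>
    intro cs h
    cases cs with
    | nil => simp [pvLoopA, pvScanB]
    | cons c rest =>
      simp at h
      by_cases hq : c = '\'' ∨ c = '"'
      · have hnd : ¬ (c = '-' ∧ rest.head? = some '-') := by
          rcases hq with hq | hq <;> subst hq <;> simp
        have hns : ¬ (c = '/' ∧ rest.head? = some '*') := by
          rcases hq with hq | hq <;> subst hq <;> simp
        rcases hq with hq | hq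
        · subst hq
          rw [show pvScanB ('\'' :: rest) = match pvFind1 '\'' rest with
              | some k => List.replicate (k + 2) ' ' ++ pvScanB (rest.drop (k + 1))
              | none => List.replicate (rest.length + 1) ' ' from by
            simp [pvScanB]]
          rw [show pvLoopA ('\'' :: rest) false false false false =
              ' ' :: pvLoopA rest true false false false from by simp [pvLoopA]]
          rw [pvLoopA_single]
          cases hf : pvFind1 '\'' rest with
          | none => simp [List.replicate_succ]
          | some k =>
            have hd : (rest.drop (k + 1)).length ≤ n := by
              have := List.length_drop (l := rest) (i := k + 1)
              omega
            simp [List.replicate_succ, ih _ hd]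
        · subst hq
          rw [show pvScanB ('"' :: rest) = match pvFind1 '"' rest with
              | some k => List.replicate (k + 2) ' ' ++ pvScanB (rest.drop (k + 1))
              | none => List.replicate (rest.length + 1) ' ' from by
            simp [pvScanB]]
          rw [show pvLoopA ('"' :: rest) false false false false =
              ' ' :: pvLoopA rest false true false false from by simp [pvLoopA]]
          rw [pvLoopA_double]
          cases hf : pvFind1 '"' rest with
          | none => simp [List.replicate_succ]
          | some k =>
            have hd : (rest.drop (k + 1)).length ≤ n := by
              have := List.length_drop (l := rest) (i := k + 1)
              omega
            simp [List.replicate_succ, ih _ hd]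
      · push_neg at hq
        obtain ⟨hq1, hq2⟩ := hq
        by_cases hd : c = '-' ∧ rest.head? = some '-'
        · obtain ⟨h1, h2⟩ := hd
          subst h1
          rw [show pvScanB ('-' :: rest) = match pvFind1 '\n' rest.tail with
              | some k => ' ' :: pvScanB (rest.tail.drop (k + 1))
              | none => [] from by simp [pvScanB, h2]]
          rw [show pvLoopA ('-' :: rest) false false false false =
              pvLoopA rest.tail false false true false from by simp [pvLoopA, h2]]
          rw [pvLoopA_line]
          cases hf : pvFind1 '\n' rest.tail with
          | none => simp
          | some k =>
            have hl : (rest.tail.drop (k + 1)).length ≤ n := by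
              have := List.length_drop (l := rest.tail) (i := k + 1)
              have := List.length_tail (l := rest)
              omega
            have he : List.drop (k + 1 + 1) rest = rest.tail.drop (k + 1) := by
              cases rest <;> simp
            simp
            rw [he]
            exact ih _ hl
        · by_cases hs : c = '/' ∧ rest.head? = some '*'
          · obtain ⟨h1, h2⟩ := hs
            subst h1
            rw [show pvScanB ('/' :: rest) = match pvFindSS rest.tail with
                | some k => ' ' :: pvScanB (rest.tail.drop (k + 2))
                | none => [] from by simp [pvScanB, h2]]
            rw [show pvLoopA ('/' :: rest) false false false false =
                pvLoopA rest.tail false false false true from by simp [pvLoopA, h2]]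
            rw [pvLoopA_block]
            cases hf : pvFindSS rest.tail with
            | none => simp
            | some k =>
              have hl : (rest.tail.drop (k + 2)).length ≤ n := by
                have := List.length_drop (l := rest.tail) (i := k + 2)
                have := List.length_tail (l := rest)
                omega
              have he : List.drop (k + 2 + 1) rest = rest.tail.drop (k + 2) := by
                cases rest <;> simp
              simp
              rw [he]
              exact ih _ hl
          · rw [show pvScanB (c :: rest) = c :: pvScanB rest from by
              simp [pvScanB, hq1, hq2, hd, hs]]
            rw [show pvLoopA (c :: rest) false false false false =
                c :: pvLoopA rest false false false false from by
              simp [pvLoopA, hq1, hq2, hd, hs]]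
            rw [ih rest (by omega)]

-- ===== VERDICT (by name: the statement is the Claim_ definition above) =====
theorem strip_literals_and_comments_py_spec : Claim_equal_strip_literals_and_comments_py := by
  intro sql _
  unfold Spec_strip_literals_and_comments_py strip_literals_and_comments_py
    strip_literals_and_comments_py_alt
  by_cases h : sql = ""
  · subst h; simp [pvScanB]; rfl
  · simp [h, pvMain sql.toList.length sql.toList le_rfl]
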